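-- pv_equiv track=rewrite | github.com/xuzhaoqing/leetcode_solutions | face_code/10.count_numbers_substring_k_distinct_characters.py | countDist
-- ===== SOURCE A (Python) =====
-- def countDist(s,k):
--     if k <= 0 or len(s) < k:
--         return []
--     ret = []
--     for i in range(len(s)-k+1):
--         if len(set(s[i:i+k])) == k and s[i:i+k] not in ret:
--             ret.append(s[i:i+k])
--     return ret
-- ===== SOURCE B (Python) =====
-- def countDist(s, k):
--     n = len(s)
--     if k <= 0 or n < k:
--         return []
--     out = []
--     seen = set()
--     start = 0        # leftmost index i such that s[i:j+1] has all-distinct characters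
--     last = {}        # last occurrence index of each character seen so far
--     for j in range(n):
--         c = s[j]
--         p = last.get(c, -1)
--         if p + 1 > start:
--             start = p + 1
--         last[c] = j
--         i = j - k + 1
--         if i >= start:
--             w = s[i:j + 1]
--             if w not in seen:
--                 seen.add(w)
--                 out.append(w)
--     return out
-- ===== Notes on version B (the rewrite author's own statement) =====
-- stated objective: faster
-- what changed: A rebuilds a character set for every window and dedups by scanning the result list; B slides once over the string maintaining a last-occurrence dict and the leftmost all-distinct start index, emitting a window exactly when its start is at or past that index, deduping with a seen set.
import Mathlib
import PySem

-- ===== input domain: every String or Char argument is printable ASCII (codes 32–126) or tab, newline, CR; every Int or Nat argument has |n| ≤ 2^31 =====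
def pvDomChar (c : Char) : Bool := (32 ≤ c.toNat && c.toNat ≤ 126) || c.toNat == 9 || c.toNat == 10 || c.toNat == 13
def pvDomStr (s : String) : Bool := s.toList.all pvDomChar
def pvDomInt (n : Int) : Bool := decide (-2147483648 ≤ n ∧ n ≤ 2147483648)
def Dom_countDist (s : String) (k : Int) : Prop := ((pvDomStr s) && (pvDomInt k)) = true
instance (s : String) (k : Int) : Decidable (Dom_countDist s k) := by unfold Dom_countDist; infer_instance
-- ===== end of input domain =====

-- B replaces A's per-window set rebuild and list-membership dedup by a one-pass sliding
-- window (last-occurrence dict + leftmost-all-distinct start index) with a seen-set dedup;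
-- return value proved equal on all inputs.


-- ===== PORT A =====
-- A on the character list; the collected windows are turned into Strings at the end.
def countDistCoreA (cs : List Char) (k : Int) : List (List Char) :=
  if k ≤ 0 || (cs.length : Int) < k then []
  else
    (PySem.List.pyRange 0 ((cs.length : Int) - k + 1) 1).foldl
      (fun ret i =>
        let w := PySem.List.slice cs (some i) (some (i + k))
        if ((PySem.Set.ofList w).length : Int) = k ∧ w ∉ ret then ret ++ [w] else ret)
      []

def countDist (s : String) (k : Int) : List String :=
  (countDistCoreA s.toList k).map String.ofList

-- ===== PORT B =====
-- one loop iteration of Source B: state = (out, seen, start, last)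
def countDistStepB (cs : List Char) (k : Int)
    (acc : List (List Char) × PySem.Set (List Char) × Int × PySem.Dict Char Int) (j : Int) :
    List (List Char) × PySem.Set (List Char) × Int × PySem.Dict Char Int :=
  let c := PySem.List.pyGetD cs j ' '
  let p := acc.2.2.2.getD c (-1)
  let start := if p + 1 > acc.2.2.1 then p + 1 else acc.2.2.1
  let last := acc.2.2.2.insert c j
  let i := j - k + 1
  if start ≤ i then
    let w := PySem.List.slice cs (some i) (some (j + 1))
    if acc.2.1.contains w then (acc.1, acc.2.1, start, last)
    else (acc.1 ++ [w], PySem.Set.add acc.2.1 w, start, last)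
  else (acc.1, acc.2.1, start, last)

def countDistCoreB (cs : List Char) (k : Int) : List (List Char) :=
  if k ≤ 0 || (cs.length : Int) < k then []
  else
    ((PySem.List.pyRange 0 (cs.length : Int) 1).foldl (countDistStepB cs k)
      ([], PySem.Set.empty, 0, PySem.Dict.empty)).1

def countDist_alt (s : String) (k : Int) : List String :=
  (countDistCoreB s.toList k).map String.ofList

-- ===== PRECONDITION & SPEC =====
def Spec_countDist (s : String) (k : Int) (out : List String) : Prop := out = countDist_alt s k
instance (s : String) (k : Int) (out : List String) : Decidable (Spec_countDist s k out) := by unfold Spec_countDist; infer_instance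

-- ===== CLAIM (what is proved, stated in full; the proofs are below) =====
def Claim_equal_countDist : Prop := ∀ (s : String) (k : Int), Dom_countDist s k → Spec_countDist s k (countDist s k)

-- ===== LEMMAS AND PROOFS =====

-- reference emission step: the window of length K starting at i, kept iff all-distinct
def emitStep (cs : List Char) (K : Nat) (acc : List (List Char)) (i : Nat) : List (List Char) :=
  if ((cs.drop i).take K).Nodup then PySem.Set.add acc ((cs.drop i).take K) else acc

-- |set(w)| = |w| iff w has no duplicate characters
theorem setLen_iff (w : List Char) : ((PySem.Set.ofList w).length = w.length) ↔ w.Nodup := by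
  have hnd : (PySem.Set.ofList w).Nodup := PySem.Set.nodup_ofList w
  have hperm : List.Perm (PySem.Set.ofList w) w.dedup := by
    rw [List.perm_ext_iff_of_nodup hnd w.nodup_dedup]
    intro a; rw [PySem.Set.mem_ofList w a, List.mem_dedup]
  rw [hperm.length_eq]
  constructor
  · intro h
    have := List.Sublist.eq_of_length w.dedup_sublist h
    rw [← this]; exact w.nodup_dedup
  · intro h; rw [List.Nodup.dedup h]

theorem coreA_eq_ref (cs : List Char) (K : Nat) (hK1 : 1 ≤ K) (hKn : K ≤ cs.length) :
    countDistCoreA cs (K : Int) = (List.range (cs.length - K + 1)).foldl (emitStep cs K) [] := by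
  unfold countDistCoreA
  have hguard : ((K : Int) ≤ 0 || (cs.length : Int) < (K : Int)) = false := by
    simp; omega
  rw [hguard]
  simp only [Bool.false_eq_true, if_false]
  rw [PySem.List.pyRange_one]
  have htn : ((cs.length : Int) - (K : Int) + 1 - 0).toNat = cs.length - K + 1 := by omega
  rw [htn, List.foldl_map]
  apply PySem.List.foldl_congr_mem
  intro acc i hi
  have hi' : i < cs.length - K + 1 := List.mem_range.mp hi
  have hslice : PySem.List.slice cs (some (0 + (i : Int))) (some (0 + (i : Int) + (K : Int))) =
      (cs.drop i).take K := by
    rw [zero_add]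
    exact PySem.List.slice_natCast_add cs i K
  simp only [hslice]
  have hwlen : ((cs.drop i).take K).length = K := by
    simp [List.length_take, List.length_drop]; omega
  unfold emitStep
  by_cases hnd : ((cs.drop i).take K).Nodup
  · have hlen : ((PySem.Set.ofList ((cs.drop i).take K)).length : Int) = (K : Int) := by
      rw [(setLen_iff _).mpr hnd, hwlen]
    rw [if_pos hnd]
    by_cases hmem : (cs.drop i).take K ∈ acc
    · rw [if_neg (by tauto), PySem.Set.add, if_pos (by simpa using hmem)]
    · rw [if_pos ⟨hlen, hmem⟩, PySem.Set.add, if_neg (by simpa using hmem)]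
  · rw [if_neg hnd, if_neg]
    rintro ⟨hlen, -⟩
    exact hnd ((setLen_iff _).mp (by omega))

-- B's loop state after the first j iterations
def stB (cs : List Char) (K : Nat) (j : Nat) :
    List (List Char) × PySem.Set (List Char) × Int × PySem.Dict Char Int :=
  (List.range j).foldl (fun acc (j' : Nat) => countDistStepB cs (K : Int) acc ((j' : Nat) : Int))
    ([], PySem.Set.empty, 0, PySem.Dict.empty)

-- the sliding-window invariant: out is the reference fold over the windows ending so far,
-- seen holds exactly out's elements, start is the leftmost index of an all-distinct
-- window ending at the current position, last maps each char to its last index so far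
theorem stB_invariant (cs : List Char) (K : Nat) (hK1 : 1 ≤ K) (j : Nat) (hj : j ≤ cs.length) :
    (stB cs K j).1 = (List.range j).foldl
        (fun acc j' => if K - 1 ≤ j' then emitStep cs K acc (j' + 1 - K) else acc) [] ∧
    (stB cs K j).2.1 = (stB cs K j).1 ∧
    (0 ≤ (stB cs K j).2.2.1 ∧
      ∀ i : Nat, i ≤ j → (((cs.take j).drop i).Nodup ↔ (stB cs K j).2.2.1 ≤ (i : Int))) ∧
    (∀ c : Char, ∀ i : Nat, i ≤ j →
      (c ∈ (cs.take j).drop i ↔ (i : Int) ≤ (stB cs K j).2.2.2.getD c (-1))) := by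
  induction j with
  | zero =>
    refine ⟨by simp [stB], by simp [stB], ⟨by simp [stB], ?_⟩, ?_⟩
    · intro i hi; interval_cases i; simp [stB]
    · intro c i hi; interval_cases i
      simp [stB, PySem.Dict.getD, PySem.Dict.get?, PySem.Dict.empty]
  | succ j ih =>
    have hj' : j ≤ cs.length := by omega
    have hjlt : j < cs.length := by omega
    obtain ⟨ihOut, ihSeen, ⟨ihS0, ihStart⟩, ihLast⟩ := ih hj'
    set st := stB cs K j with hst
    have hnew : stB cs K (j+1) = countDistStepB cs (K : Int) st ((j : Nat) : Int) := by
      unfold stB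
      rw [List.range_succ, List.foldl_append]
      rfl
    have hc : PySem.List.pyGetD cs ((j : Nat) : Int) ' ' = cs[j] := by
      rw [PySem.List.pyGetD_natCast]
      exact List.getD_eq_getElem cs ' ' hjlt
    set ch := cs[j] with hch
    set p := st.2.2.2.getD ch (-1) with hp
    set start' : Int := if p + 1 > st.2.2.1 then p + 1 else st.2.2.1 with hstart'
    have hplt : p < (j : Int) := by
      by_contra h
      have := (ihLast ch j (le_refl j)).mpr (by omega)
      simp at this
    have hstartle : st.2.2.1 ≤ (j : Int) := by
      exact (ihStart j (le_refl j)).mp (by simp)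
    have hs'0 : 0 ≤ start' := by
      rw [hstart']; split <;> omega
    have hs'le : start' ≤ (j : Int) + 1 := by
      rw [hstart']; split <;> omega
    have htake : cs.take (j+1) = cs.take j ++ [ch] := by
      rw [List.take_add_one]
      simp [List.getElem?_eq_getElem hjlt, hch]
    have hdrop : ∀ i : Nat, i ≤ j → (cs.take (j+1)).drop i = (cs.take j).drop i ++ [ch] := by
      intro i hi
      rw [htake, List.drop_append_of_le_length]
      simp; omega
    have hdropj1 : (cs.take (j+1)).drop (j+1) = [] := by
      apply List.drop_eq_nil_of_le
      simp
    have hStartNew : ∀ i : Nat, i ≤ j + 1 →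
        (((cs.take (j+1)).drop i).Nodup ↔ start' ≤ (i : Int)) := by
      intro i hi
      rcases Nat.lt_or_ge i (j+1) with hlt | hge
      · have hi' : i ≤ j := by omega
        rw [hdrop i hi']
        have hnc : ((cs.take j).drop i ++ [ch]).Nodup ↔
            ((cs.take j).drop i).Nodup ∧ ch ∉ (cs.take j).drop i := by
          simp [List.nodup_append]
          intro _
          constructor
          · intro h hm; exact h ch hm rfl
          · intro h a ha he; exact h (he ▸ ha)
        rw [hnc, ihStart i hi', ihLast ch i hi']
        rw [hstart']
        constructor
        · rintro ⟨h1, h2⟩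
          split <;> omega
        · intro h
          constructor
          · split at h <;> omega
          · intro hcm
            have : (i : Int) ≤ p := hcm
            split at h <;> omega
      · have : i = j + 1 := by omega
        subst this
        rw [hdropj1]
        simp only [List.nodup_nil, true_iff]
        omega
    have hLastNew : ∀ c : Char, ∀ i : Nat, i ≤ j + 1 →
        (c ∈ (cs.take (j+1)).drop i ↔
          (i : Int) ≤ (st.2.2.2.insert ch ((j : Nat) : Int)).getD c (-1)) := by
      intro c i hi
      by_cases hcc : c = ch
      · subst hcc
        rw [PySem.Dict.getD_insert, if_pos rfl]
        rcases Nat.lt_or_ge i (j+1) with hlt | hge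
        · rw [hdrop i (by omega)]
          simp only [List.mem_append, List.mem_singleton, or_true, true_iff]
          omega
        · have : i = j + 1 := by omega
          subst this
          rw [hdropj1]
          simp only [List.not_mem_nil, false_iff]
          omega
      · rw [PySem.Dict.getD_insert_of_ne _ _ _ hcc]
        rcases Nat.lt_or_ge i (j+1) with hlt | hge
        · rw [hdrop i (by omega)]
          have hm : c ∈ (cs.take j).drop i ++ [ch] ↔ c ∈ (cs.take j).drop i := by
            simp [hcc]
          rw [hm, ihLast c i (by omega)]
        · have : i = j + 1 := by omega
          subst this
          rw [hdropj1]
          have hlast : ¬ ((j : Int) ≤ st.2.2.2.getD c (-1)) := by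
            intro h
            have := (ihLast c j (le_refl j)).mpr h
            simp at this
          simp only [List.not_mem_nil, false_iff]
          omega
    -- assemble the new state
    rw [hnew]
    unfold countDistStepB
    simp only [hc]
    rw [← hp, ← hstart']
    rw [List.range_succ, List.foldl_append, List.foldl_cons, List.foldl_nil, ← ihOut]
    by_cases hem : start' ≤ ((j : Nat) : Int) - (K : Int) + 1
    · -- a window ends here and is all-distinct
      have hKj : K - 1 ≤ j := by omega
      have hi0 : (((j + 1 - K : Nat)) : Int) = ((j : Nat) : Int) - (K : Int) + 1 := by omega
      have hw : PySem.List.slice cs (some (((j : Nat) : Int) - (K : Int) + 1))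
          (some (((j : Nat) : Int) + 1)) = (cs.drop (j + 1 - K)).take K := by
        rw [← hi0]
        have h2 : ((j : Nat) : Int) + 1 = ((j + 1 - K : Nat) : Int) + (K : Int) := by omega
        rw [h2]
        exact PySem.List.slice_natCast_add cs (j + 1 - K) K
      have hwin : (cs.take (j+1)).drop (j + 1 - K) = (cs.drop (j + 1 - K)).take K := by
        rw [List.drop_take]
        congr 1
        omega
      have hnodup : ((cs.drop (j + 1 - K)).take K).Nodup := by
        rw [← hwin]
        exact (hStartNew (j + 1 - K) (by omega)).mpr (by rw [hi0]; exact hem)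
      rw [if_pos hem]
      simp only [hw, if_pos hKj, ihSeen]
      unfold emitStep
      rw [if_pos hnodup]
      by_cases hcont : PySem.Set.contains st.1 ((cs.drop (j + 1 - K)).take K) = true
      · rw [if_pos hcont]
        refine ⟨?_, ?_, ⟨hs'0, hStartNew⟩, hLastNew⟩ <;>
          simp [PySem.Set.add, (PySem.Set.contains_iff _ _).mp hcont]
      · have hnm : (cs.drop (j + 1 - K)).take K ∉ st.1 :=
          fun h => hcont ((PySem.Set.contains_iff st.1 _).mpr h)
        rw [if_neg hcont]
        refine ⟨?_, ?_, ⟨hs'0, hStartNew⟩, hLastNew⟩ <;>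
          simp [PySem.Set.add, hnm]
    · -- no all-distinct window ends here
      rw [if_neg hem]
      have hout : (if K - 1 ≤ j then emitStep cs K st.1 (j + 1 - K) else st.1) = st.1 := by
        by_cases hKj : K - 1 ≤ j
        · have hi0 : (((j + 1 - K : Nat)) : Int) = ((j : Nat) : Int) - (K : Int) + 1 := by omega
          have hwin : (cs.take (j+1)).drop (j + 1 - K) = (cs.drop (j + 1 - K)).take K := by
            rw [List.drop_take]
            congr 1
            omega
          have hnd : ¬ ((cs.drop (j + 1 - K)).take K).Nodup := by
            rw [← hwin]
            intro h
            exact hem (by rw [← hi0]; exact (hStartNew (j + 1 - K) (by omega)).mp h)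
          rw [if_pos hKj]
          unfold emitStep
          rw [if_neg hnd]
        · rw [if_neg hKj]
      rw [hout]
      exact ⟨rfl, ihSeen, ⟨hs'0, hStartNew⟩, hLastNew⟩

theorem foldl_id {α β : Type} (l : List α) (x : β) : l.foldl (fun acc _ => acc) x = x := by
  induction l generalizing x with
  | nil => rfl
  | cons a l ih => simpa using ih x

theorem reindex (cs : List Char) (K : Nat) (hK1 : 1 ≤ K) (hKn : K ≤ cs.length) :
    (List.range cs.length).foldl
        (fun acc j' => if K - 1 ≤ j' then emitStep cs K acc (j' + 1 - K) else acc) [] =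
      (List.range (cs.length - K + 1)).foldl (emitStep cs K) [] := by
  conv_lhs => rw [show cs.length = (K - 1) + (cs.length - K + 1) from by omega]
  rw [List.range_add, List.foldl_append, List.foldl_map]
  have h1 : (List.range (K - 1)).foldl
      (fun acc j' => if K - 1 ≤ j' then emitStep cs K acc (j' + 1 - K) else acc) [] = [] := by
    rw [PySem.List.foldl_congr_mem _ _ (fun acc _ => acc) _
      (fun acc x hx => by rw [if_neg (by have := List.mem_range.mp hx; omega)])]
    exact foldl_id _ _
  rw [h1]
  apply PySem.List.foldl_congr_mem
  intro acc i hi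
  rw [if_pos (by omega)]
  congr 1
  omega

theorem coreB_eq_ref (cs : List Char) (K : Nat) (hK1 : 1 ≤ K) (hKn : K ≤ cs.length) :
    countDistCoreB cs (K : Int) = (List.range (cs.length - K + 1)).foldl (emitStep cs K) [] := by
  unfold countDistCoreB
  have hguard : ((K : Int) ≤ 0 || (cs.length : Int) < (K : Int)) = false := by
    simp; omega
  rw [hguard]
  simp only [Bool.false_eq_true, if_false]
  rw [PySem.List.pyRange_one]
  have htn : ((cs.length : Int) - 0).toNat = cs.length := by omega
  rw [htn, List.foldl_map]
  rw [PySem.List.foldl_congr_mem (List.range cs.length) _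
    (fun acc (j' : Nat) => countDistStepB cs (K : Int) acc (j' : Int)) _
    (fun acc x _ => by rw [zero_add])]
  have hout := (stB_invariant cs K hK1 cs.length (le_refl _)).1
  unfold stB at hout
  rw [hout]
  exact reindex cs K hK1 hKn

theorem core_eq (cs : List Char) (k : Int) : countDistCoreA cs k = countDistCoreB cs k := by
  by_cases h : k ≤ 0 ∨ (cs.length : Int) < k
  · unfold countDistCoreA countDistCoreB
    rcases h with h | h <;> simp [h]
  · have h1 : ¬ k ≤ 0 := fun hh => h (Or.inl hh)
    have h2 : ¬ (cs.length : Int) < k := fun hh => h (Or.inr hh)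
    have hk : k = ((k.toNat : Nat) : Int) := by omega
    rw [hk, coreA_eq_ref cs k.toNat (by omega) (by omega),
      coreB_eq_ref cs k.toNat (by omega) (by omega)]

-- ===== VERDICT (by name: the statement is the Claim_ definition above) =====
theorem countDist_spec : Claim_equal_countDist := by
  intro s k _
  unfold Spec_countDist countDist countDist_alt
  rw [core_eq]
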